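-- pv_equiv track=rewrite | github.com/hankcs/HanLP | hanlp/transform/txt.py | bmes_of
-- ===== SOURCE A (Python) =====
-- def bmes_of(sentence, segmented):
--     if segmented:
--         chars = []
--         tags = []
--         words = sentence.split()
--         for w in words:
--             chars.extend(list(w))
--             if len(w) == 1:
--                 tags.append('S')
--             else:
--                 tags.extend(['B'] + ['M'] * (len(w) - 2) + ['E'])
--     else:
--         chars = list(sentence)
--         tags = ['S'] * len(chars)
--     return chars, tags
-- ===== SOURCE B (Python) =====
-- def bmes_of(sentence, segmented):
--     if segmented:
--         chars = []
--         tags = []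
--         n = len(sentence)
--         for i, c in enumerate(sentence):
--             if c.isspace():
--                 continue
--             prev_in = i > 0 and not sentence[i - 1].isspace()
--             next_in = i + 1 < n and not sentence[i + 1].isspace()
--             chars.append(c)
--             tags.append('M' if prev_in and next_in else
--                         'B' if next_in else
--                         'E' if prev_in else 'S')
--     else:
--         chars = list(sentence)
--         tags = ['S'] * len(chars)
--     return chars, tags
-- ===== Notes on version B (the rewrite author's own statement) =====
-- stated objective: alternative
-- what changed: B never calls split(): it makes a single scan over the raw sentence and tags each non-space character locally from whether its previous/next neighbour is a non-space character (M/B/E/S), instead of A's build-the-word-list then emit ['B']+['M']*(n-2)+['E'] per word.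
import Mathlib
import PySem

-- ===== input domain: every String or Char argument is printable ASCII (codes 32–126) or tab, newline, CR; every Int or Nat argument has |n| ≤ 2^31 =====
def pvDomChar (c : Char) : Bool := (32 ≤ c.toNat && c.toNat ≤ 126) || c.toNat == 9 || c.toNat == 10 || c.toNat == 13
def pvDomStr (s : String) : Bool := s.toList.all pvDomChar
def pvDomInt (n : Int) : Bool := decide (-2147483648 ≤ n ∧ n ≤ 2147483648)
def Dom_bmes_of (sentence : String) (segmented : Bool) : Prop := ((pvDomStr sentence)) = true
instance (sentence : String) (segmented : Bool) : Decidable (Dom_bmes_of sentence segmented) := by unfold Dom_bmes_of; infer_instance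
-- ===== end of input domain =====

-- B replaces A's split()-then-tag-per-word construction with a single scan over the raw
-- sentence that tags each non-space character from its neighbours (prev/next in-word),
-- never building the word list. (objective: alternative)

-- ===== PORT A =====
def bmes_of (sentence : String) (segmented : Bool) : List String × List String :=
  if segmented then
    ((PySem.Str.split₀ sentence).foldl
      (fun (st : List String × List String) w =>
        (st.1 ++ w.toList.map (fun c => String.ofList [c]),
         if w.toList.length == 1 then st.2 ++ ["S"]
         else st.2 ++ (["B"] ++ List.replicate (w.toList.length - 2) "M" ++ ["E"])))
      ([], []))
  else
    let chars := sentence.toList.map (fun c => String.ofList [c])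
    (chars, List.replicate chars.length "S")

-- ===== PORT B =====
-- the two neighbour lookups sentence[i-1] / sentence[i+1] are guarded in Source B (i > 0,
-- i + 1 < n), so the index is always in range when the value is consulted; pyGetD's
-- default ' ' is never observed.
def bmes_of_alt (sentence : String) (segmented : Bool) : List String × List String :=
  if segmented then
    let cs := sentence.toList
    let n : Int := cs.length
    (PySem.List.enumerate cs).foldl
      (fun (st : List String × List String) ic =>
        if PySem.Chars.isspace ic.2 then st
        else
          let prev_in := decide (0 < ic.1) && !(PySem.Chars.isspace (PySem.List.pyGetD cs (ic.1 - 1) ' '))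
          let next_in := decide (ic.1 + 1 < n) && !(PySem.Chars.isspace (PySem.List.pyGetD cs (ic.1 + 1) ' '))
          (st.1 ++ [String.ofList [ic.2]],
           st.2 ++ [if prev_in && next_in then "M"
                    else if next_in then "B"
                    else if prev_in then "E" else "S"]))
      ([], [])
  else
    let chars := sentence.toList.map (fun c => String.ofList [c])
    (chars, List.replicate chars.length "S")

-- ===== PRECONDITION & SPEC =====
def Spec_bmes_of (sentence : String) (segmented : Bool) (out : List String × List String) : Prop := out = bmes_of_alt sentence segmented
instance (sentence : String) (segmented : Bool) (out : List String × List String) : Decidable (Spec_bmes_of sentence segmented out) := by unfold Spec_bmes_of; infer_instance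

-- ===== CLAIM (what is proved, stated in full; the proofs are below) =====
def Claim_equal_bmes_of : Prop := ∀ (sentence : String) (segmented : Bool), Dom_bmes_of sentence segmented → Spec_bmes_of sentence segmented (bmes_of sentence segmented)

-- ===== LEMMAS AND PROOFS =====

-- one-character string
def pvCharStr (c : Char) : String := String.ofList [c]
-- chars contributed by one word (A's view)
def pvCharsOf (w : List Char) : List String := w.map pvCharStr
-- tags contributed by one word (A's view)
def pvPatOf (w : List Char) : List String :=
  if w.length == 1 then ["S"] else ["B"] ++ List.replicate (w.length - 2) "M" ++ ["E"]
-- is the adjacent character (if any) part of a word?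
def pvNextB : List Char → Bool
  | [] => false
  | d :: _ => !PySem.Chars.isspace d
-- does the remainder start at a word boundary (empty or space)?
def pvHeadSp : List Char → Bool
  | [] => true
  | d :: _ => PySem.Chars.isspace d
-- B's positional tag
def pvTag (prev next : Bool) : String :=
  if prev && next then "M" else if next then "B" else if prev then "E" else "S"
-- structural form of B's scan: prev = "previous char exists and is non-space"
def pvBrec : List Char → Bool → List String × List String
  | [], _ => ([], [])
  | c :: rest, prev =>
    if PySem.Chars.isspace c then pvBrec rest false
    else
      let next := pvNextB rest
      let r := pvBrec rest true
      (pvCharStr c :: r.1, pvTag prev next :: r.2)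

lemma pvBrec_cons_space (c : Char) (rest : List Char) (prev : Bool)
    (hc : PySem.Chars.isspace c = true) :
    pvBrec (c :: rest) prev = pvBrec rest false := by
  simp [pvBrec, hc]

lemma pvBrec_cons_nonspace (c : Char) (rest : List Char) (prev : Bool)
    (hc : PySem.Chars.isspace c = false) :
    pvBrec (c :: rest) prev
      = (pvCharStr c :: (pvBrec rest true).1,
         pvTag prev (pvNextB rest) :: (pvBrec rest true).2) := by
  simp [pvBrec, hc]

-- A's fold = flatMap of per-word chars and tags
lemma pvA_fold (ws : List String) (st : List String × List String) :
    ws.foldl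
      (fun (st : List String × List String) w =>
        (st.1 ++ w.toList.map (fun c => String.ofList [c]),
         if w.toList.length == 1 then st.2 ++ ["S"]
         else st.2 ++ (["B"] ++ List.replicate (w.toList.length - 2) "M" ++ ["E"])))
      st
    = (st.1 ++ ws.flatMap (fun w => pvCharsOf w.toList),
       st.2 ++ ws.flatMap (fun w => pvPatOf w.toList)) := by
  induction ws generalizing st with
  | nil => simp
  | cons w ws ih =>
    simp only [List.foldl_cons, ih, List.flatMap_cons, pvCharsOf, pvPatOf]
    split_ifs <;> simp [pvCharStr]

-- go with a non-trivial accumulator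
lemma pv_go_acc (cs cur : List Char) (acc : List (List Char)) :
    PySem.Chars.split₀.go cs cur acc = acc.reverse ++ PySem.Chars.split₀.go cs cur [] := by
  induction cs generalizing cur acc with
  | nil => simp only [PySem.Chars.split₀.go]; split_ifs <;> simp
  | cons c rest ih =>
    simp only [PySem.Chars.split₀.go]
    split_ifs with h1 h2
    · exact ih [] acc
    · rw [ih [] (cur.reverse :: acc), ih [] [cur.reverse]]; simp
    · exact ih (c :: cur) acc

-- go consumes a block of non-space characters into cur
lemma pv_go_word (w rest cur : List Char) (acc : List (List Char))
    (hw : ∀ c ∈ w, PySem.Chars.isspace c = false) :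
    PySem.Chars.split₀.go (w ++ rest) cur acc
      = PySem.Chars.split₀.go rest (w.reverse ++ cur) acc := by
  induction w generalizing cur with
  | nil => simp
  | cons c w ih =>
    have hc := hw c (by simp)
    simp only [List.cons_append, PySem.Chars.split₀.go, hc, Bool.false_eq_true, if_false]
    rw [ih (c :: cur) (fun d hd => hw d (by simp [hd]))]
    simp

lemma pv_split0_cons_space (c : Char) (rest : List Char) (hc : PySem.Chars.isspace c = true) :
    PySem.Chars.split₀ (c :: rest) = PySem.Chars.split₀ rest := by
  simp [PySem.Chars.split₀, PySem.Chars.split₀.go, hc]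

lemma pv_split0_cons_word (c : Char) (rest : List Char) (hc : PySem.Chars.isspace c = false) :
    PySem.Chars.split₀ (c :: rest)
      = (c :: rest.takeWhile (fun d => !PySem.Chars.isspace d))
        :: PySem.Chars.split₀ (rest.dropWhile (fun d => !PySem.Chars.isspace d)) := by
  have hsplit : rest = rest.takeWhile (fun d => !PySem.Chars.isspace d)
      ++ rest.dropWhile (fun d => !PySem.Chars.isspace d) := (List.takeWhile_append_dropWhile).symm
  have hwnw : ∀ d ∈ rest.takeWhile (fun d => !PySem.Chars.isspace d), PySem.Chars.isspace d = false := by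
    intro d hd
    have := List.mem_takeWhile_imp hd
    simpa using this
  conv_lhs => rw [PySem.Chars.split₀, hsplit]
  show PySem.Chars.split₀.go (c :: (_ ++ _)) [] [] = _
  rw [show (c :: (rest.takeWhile (fun d => !PySem.Chars.isspace d) ++ rest.dropWhile (fun d => !PySem.Chars.isspace d)))
      = (c :: rest.takeWhile (fun d => !PySem.Chars.isspace d)) ++ rest.dropWhile (fun d => !PySem.Chars.isspace d) by simp]
  have hall : ∀ d ∈ c :: rest.takeWhile (fun d => !PySem.Chars.isspace d), PySem.Chars.isspace d = false := by
    intro d hd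
    rcases List.mem_cons.mp hd with h | h
    · rw [h]; exact hc
    · exact hwnw d h
  rw [pv_go_word _ _ _ _ hall]
  cases hr : rest.dropWhile (fun d => !PySem.Chars.isspace d) with
  | nil =>
    simp only [PySem.Chars.split₀.go]
    simp [PySem.Chars.split₀, PySem.Chars.split₀.go]
  | cons d r' =>
    have hd : PySem.Chars.isspace d = true := by
      have := List.head_dropWhile_not (fun d => !PySem.Chars.isspace d) (l := rest) (by simp [hr])
      simp only [hr, List.head_cons] at this
      simpa using this
    simp only [PySem.Chars.split₀.go, hd, if_true]
    rw [if_neg (by simp), pv_go_acc]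
    simp [PySem.Chars.split₀, PySem.Chars.split₀.go, hd]

-- when the next char is a space (or none), prev does not matter
lemma pv_tail_eq (rest : List Char) (h : pvHeadSp rest = true) :
    pvBrec rest true = pvBrec rest false := by
  cases rest with
  | nil => rfl
  | cons d r => simp only [pvHeadSp] at h; simp [pvBrec, h]

-- B's scan through a maximal non-space block with prev = true: all M, last E
lemma pv_brec_word (w rest : List Char) (hne : w ≠ [])
    (hw : ∀ c ∈ w, PySem.Chars.isspace c = false)
    (h : pvHeadSp rest = true) :
    pvBrec (w ++ rest) true
      = (pvCharsOf w ++ (pvBrec rest false).1,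
         (List.replicate (w.length - 1) "M" ++ ["E"]) ++ (pvBrec rest false).2) := by
  induction w with
  | nil => exact absurd rfl hne
  | cons c w ih =>
    have hc : PySem.Chars.isspace c = false := hw c (by simp)
    cases w with
    | nil =>
      have hnext : pvNextB rest = false := by
        cases rest with
        | nil => rfl
        | cons d r => simp only [pvHeadSp] at h; simp [pvNextB, h]
      simp only [List.cons_append, List.nil_append]
      rw [pvBrec_cons_nonspace c rest true hc, pv_tail_eq rest h]
      simp [pvCharsOf, pvTag, hnext]
    | cons d w' =>
      have hd : PySem.Chars.isspace d = false := hw d (by simp)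
      have hih := ih (by simp) (fun e he => hw e (List.mem_cons_of_mem c he))
      simp only [List.cons_append] at hih ⊢
      rw [pvBrec_cons_nonspace c _ true hc, hih]
      simp [pvCharsOf, pvTag, pvNextB, hd, List.replicate_succ]

-- B's scan = A's per-word construction over split()
lemma pv_brec_split (cs : List Char) :
    pvBrec cs false
      = ((PySem.Chars.split₀ cs).flatMap pvCharsOf,
         (PySem.Chars.split₀ cs).flatMap pvPatOf) := by
  generalize hn : cs.length = n
  induction n using Nat.strong_induction_on generalizing cs with
  | _ n ihn =>
  cases cs with
  | nil =>
    simp [pvBrec, PySem.Chars.split₀, PySem.Chars.split₀.go]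
  | cons c rest =>
    by_cases hc : PySem.Chars.isspace c = true
    · rw [pv_split0_cons_space c rest hc]
      rw [pvBrec_cons_space c rest false hc]
      exact ihn rest.length (by simp [← hn]) rest rfl
    · have hc' : PySem.Chars.isspace c = false := by simpa using hc
      rw [pv_split0_cons_word c rest hc']
      have hsplit : rest = rest.takeWhile (fun d => !PySem.Chars.isspace d)
          ++ rest.dropWhile (fun d => !PySem.Chars.isspace d) := (List.takeWhile_append_dropWhile).symm
      have hwnw : ∀ d ∈ rest.takeWhile (fun d => !PySem.Chars.isspace d), PySem.Chars.isspace d = false := by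
        intro d hd
        have := List.mem_takeWhile_imp hd
        simpa using this
      have hheadsp : pvHeadSp (rest.dropWhile (fun d => !PySem.Chars.isspace d)) = true := by
        cases hr : rest.dropWhile (fun d => !PySem.Chars.isspace d) with
        | nil => rfl
        | cons d r' =>
          simp only [pvHeadSp]
          have := List.head_dropWhile_not (fun d => !PySem.Chars.isspace d) (l := rest) (by simp [hr])
          simp only [hr, List.head_cons] at this
          simpa using this
      have hdroplen : (rest.dropWhile (fun d => !PySem.Chars.isspace d)).length < n := by
        have := List.length_dropWhile_le (fun d => !PySem.Chars.isspace d) rest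
        simp only [← hn, List.length_cons]; omega
      have hdrop := ihn _ hdroplen (rest.dropWhile (fun d => !PySem.Chars.isspace d)) rfl
      cases hw : rest.takeWhile (fun d => !PySem.Chars.isspace d) with
      | nil =>
        have hrest : rest = rest.dropWhile (fun d => !PySem.Chars.isspace d) := by
          conv_lhs => rw [hsplit, hw]
          simp
        have hnext : pvNextB rest = false := by
          rw [hrest]
          cases hr : rest.dropWhile (fun d => !PySem.Chars.isspace d) with
          | nil => rfl
          | cons d r' => rw [hr] at hheadsp; simp only [pvHeadSp] at hheadsp; simp [pvNextB, hheadsp]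
        rw [pvBrec_cons_nonspace c rest false hc', hnext]
        rw [show pvBrec rest true = pvBrec rest false from by
          rw [hrest]; exact pv_tail_eq _ hheadsp]
        rw [← hrest] at hdrop
        rw [← hrest, hdrop]
        simp [pvCharsOf, pvPatOf, pvTag, pvCharStr]
      | cons d w' =>
        have hnext : pvNextB rest = true := by
          conv_lhs => rw [hsplit, hw]
          simp only [List.cons_append]
          have : PySem.Chars.isspace d = false := hwnw d (by rw [hw]; simp)
          simp [pvNextB, this]
        rw [pvBrec_cons_nonspace c rest false hc', hnext]
        have hbw := pv_brec_word (d :: w') (rest.dropWhile (fun e => !PySem.Chars.isspace e))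
          (by simp) (by rw [← hw]; exact hwnw) hheadsp
        rw [show pvBrec rest true
            = pvBrec ((d :: w') ++ rest.dropWhile (fun e => !PySem.Chars.isspace e)) true from by
          conv_lhs => rw [hsplit, hw]]
        rw [hbw, hdrop]
        simp only [Prod.mk.injEq, List.flatMap_cons]
        refine ⟨by simp [pvCharsOf], ?_⟩
        have hpat : pvPatOf (c :: d :: w') = "B" :: (List.replicate ((d :: w').length - 1) "M" ++ ["E"]) := by
          simp [pvPatOf]
        rw [hpat]
        simp [pvTag]

-- B's indexed fold = the structural scan pvBrec
lemma pv_b_fold (cs : List Char) (suf pre : List Char) (st : List String × List String)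
    (hsplit : cs = pre ++ suf) :
    (PySem.List.enumerate suf (pre.length : Int)).foldl
      (fun (st : List String × List String) ic =>
        if PySem.Chars.isspace ic.2 then st
        else
          let prev_in := decide (0 < ic.1) && !(PySem.Chars.isspace (PySem.List.pyGetD cs (ic.1 - 1) ' '))
          let next_in := decide (ic.1 + 1 < (cs.length : Int)) && !(PySem.Chars.isspace (PySem.List.pyGetD cs (ic.1 + 1) ' '))
          (st.1 ++ [String.ofList [ic.2]],
           st.2 ++ [if prev_in && next_in then "M"
                    else if next_in then "B"
                    else if prev_in then "E" else "S"]))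
      st
    = (st.1 ++ (pvBrec suf (decide (0 < (pre.length : Int)) && !(PySem.Chars.isspace (PySem.List.pyGetD cs ((pre.length : Int) - 1) ' ')))).1,
       st.2 ++ (pvBrec suf (decide (0 < (pre.length : Int)) && !(PySem.Chars.isspace (PySem.List.pyGetD cs ((pre.length : Int) - 1) ' ')))).2) := by
  induction suf generalizing pre st with
  | nil => simp [pvBrec]
  | cons c rest ih =>
    rw [PySem.List.enumerate_cons, List.foldl_cons]
    have hget : PySem.List.pyGetD cs (pre.length : Int) ' ' = c := by
      subst hsplit
      rw [PySem.List.pyGetD_natCast]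
      rw [List.getD_eq_getElem _ _ (by simp)]
      simp [List.getElem_append_right (Nat.le_refl pre.length)]
    have hprev' : (decide (0 < ((pre ++ [c]).length : Int))
        && !(PySem.Chars.isspace (PySem.List.pyGetD cs (((pre ++ [c]).length : Int) - 1) ' ')))
        = !(PySem.Chars.isspace c) := by
      have h1 : (((pre ++ [c]).length : Int) - 1) = (pre.length : Int) := by simp
      rw [h1, hget]
      simp
    have hlen : ((pre ++ [c]).length : Int) = (pre.length : Int) + 1 := by simp
    by_cases hc : PySem.Chars.isspace c = true
    · rw [if_pos hc]
      have hrec := ih (pre ++ [c]) st (by simp [hsplit])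
      rw [hprev', hlen] at hrec
      simp only [hc, Bool.not_true] at hrec
      rw [hrec, pvBrec_cons_space c rest _ hc]
    · have hc' : PySem.Chars.isspace c = false := by simpa using hc
      rw [if_neg (by simp [hc'])]
      have hnext : (decide ((pre.length : Int) + 1 < (cs.length : Int))
          && !(PySem.Chars.isspace (PySem.List.pyGetD cs ((pre.length : Int) + 1) ' ')))
          = pvNextB rest := by
        subst hsplit
        cases rest with
        | nil => simp [pvNextB]
        | cons d r =>
          have hg : PySem.List.pyGetD (pre ++ c :: d :: r) ((pre.length : Int) + 1) ' ' = d := by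
            rw [show ((pre.length : Int) + 1) = ((pre.length + 1 : Nat) : Int) by push_cast; ring]
            rw [PySem.List.pyGetD_natCast]
            rw [List.getD_eq_getElem _ _ (by simp)]
            rw [List.getElem_append_right (by omega)]
            simp
          simp [pvNextB, hg]
      have hrec := ih (pre ++ [c])
        (st.1 ++ [String.ofList [c]],
         st.2 ++ [if (decide (0 < (pre.length : Int)) && !(PySem.Chars.isspace (PySem.List.pyGetD cs ((pre.length : Int) - 1) ' ')))
                     && (decide ((pre.length : Int) + 1 < (cs.length : Int)) && !(PySem.Chars.isspace (PySem.List.pyGetD cs ((pre.length : Int) + 1) ' '))) then "M"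
                  else if decide ((pre.length : Int) + 1 < (cs.length : Int)) && !(PySem.Chars.isspace (PySem.List.pyGetD cs ((pre.length : Int) + 1) ' ')) then "B"
                  else if decide (0 < (pre.length : Int)) && !(PySem.Chars.isspace (PySem.List.pyGetD cs ((pre.length : Int) - 1) ' ')) then "E" else "S"])
        (by simp [hsplit])
      rw [hprev', hlen] at hrec
      simp only [hc', Bool.not_false] at hrec
      rw [hrec, pvBrec_cons_nonspace c rest _ hc']
      simp only [hnext, pvTag, pvCharStr]
      simp [Bool.and_comm]

-- ===== VERDICT (by name: the statement is the Claim_ definition above) =====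
theorem bmes_of_spec : Claim_equal_bmes_of := by
  intro sentence segmented _
  unfold Spec_bmes_of bmes_of bmes_of_alt
  cases segmented with
  | false => rfl
  | true =>
    simp only [if_true]
    have hb := pv_b_fold sentence.toList sentence.toList [] ([], []) (by simp)
    simp only [List.length_nil, Int.natCast_zero] at hb
    rw [hb]
    have hm : List.map String.toList (PySem.Str.split₀ sentence) = PySem.Chars.split₀ sentence.toList :=
      PySem.Str.split₀_map_toList sentence
    rw [pvA_fold]
    norm_num
    rw [pv_brec_split]
    have h1 : (PySem.Str.split₀ sentence).flatMap (fun w => pvCharsOf w.toList)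
        = (PySem.Chars.split₀ sentence.toList).flatMap pvCharsOf := by
      rw [← hm, List.flatMap_map]
    have h2 : (PySem.Str.split₀ sentence).flatMap (fun w => pvPatOf w.toList)
        = (PySem.Chars.split₀ sentence.toList).flatMap pvPatOf := by
      rw [← hm, List.flatMap_map]
    simp [h1, h2]
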